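-- pv_equiv track=rewrite | github.com/AdamZhouSE/pythonHomework | Code/CodeRecords/2953/60739/308310.py | getNlist
-- ===== SOURCE A (Python) =====
-- def factorization(num):
--     factor = []
--     while num > 1:
--         for i in range(num - 1):
--             k = i + 2
--             if num % k == 0:
--                 factor.append(k)
--                 num = int(num / k)
--                 break
--     return factor
--
-- def isValid(n, list):
--     for i in range (len(list)):
--         if n % list[i] == 0:
--             return True
--     return False
--
-- def getStep(a, b):
--     if b == 1:
--         return a - 1
--     elif b == 0:
--         return 100
--     else:
--         return a // b + getStep(b, a % b)
--
-- def getNlist(n):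
--     if n == 1:
--         return 0
--     l = []
--     fac = factorization(n)
--     for i in range (1, int(n/2 + 1)):
--         if isValid(i, fac) == False:
--             l.append(getStep(n, i))
--     return int(min(l))
-- ===== SOURCE B (Python) =====
-- def getNlist(n):
--     if n == 1:
--         return 0
--     best = n - 1  # i = 1 is always coprime to n and costs n - 1 steps
--     for i in range(2, n // 2 + 1):
--         a, b, steps = n, i, 0
--         while b > 1:
--             steps += a // b
--             a, b = b, a % b
--         if b == 1:  # gcd(n, i) == 1
--             steps += a - 1
--             if steps < best:
--                 best = steps
--     return best
-- ===== Notes on version B (the rewrite author's own statement) =====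
-- stated objective: simpler
-- what changed: Drops the factorization/isValid machinery and the recursive getStep entirely: one iterative Euclid loop per candidate i both detects gcd(n,i)=1 and accumulates the quotient sum, with a running minimum seeded by the i=1 cost n-1.
-- outside the precondition, e.g. on getNlist(0): A raises ValueError, B returns -1
import Mathlib
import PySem

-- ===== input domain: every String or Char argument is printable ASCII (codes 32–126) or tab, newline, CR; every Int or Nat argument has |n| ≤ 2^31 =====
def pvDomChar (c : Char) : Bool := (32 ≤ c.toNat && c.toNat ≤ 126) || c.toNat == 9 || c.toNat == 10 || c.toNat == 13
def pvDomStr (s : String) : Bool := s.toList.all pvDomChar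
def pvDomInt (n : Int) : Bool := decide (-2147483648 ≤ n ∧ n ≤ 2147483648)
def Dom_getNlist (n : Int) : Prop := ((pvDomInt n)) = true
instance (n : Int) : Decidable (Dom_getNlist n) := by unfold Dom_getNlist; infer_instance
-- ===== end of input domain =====

-- B replaces A's pyFactorization + prime-divisibility filter + recursive quotient-sum by one iterative
-- Euclid loop per candidate that detects gcd(n,i)=1 and sums the quotients at once; objective: simpler.

-- ===== PORT A =====
-- for i in range(len(list)): if n % list[i] == 0: return True  (obvious structural recursion on the list)
def pyIsValid (nn : Int) : List Int → Bool
  | [] => false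
  | k :: rest => if PySem.Int.mod nn k == 0 then true else pyIsValid nn rest

-- the inner 'for i in range(num - 1): k = i + 2; if num % k == 0: ... break' — first divisor found, if any
def innerLoop (num : Int) : List Int → Option Int
  | [] => none
  | i :: rest => if PySem.Int.mod num (i + 2) == 0 then some (i + 2) else innerLoop num rest

-- the 'while num > 1' loop of pyFactorization, with fuel (num strictly decreases; fuel num.toNat suffices, see facLoop_spec)
def facLoop : Nat → Int → List Int → List Int
  | 0, _, factor => factor
  | fuel + 1, num, factor =>
    if 1 < num then
      match innerLoop num (PySem.List.pyRange 0 (num - 1) 1) with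
      -- int(num / k) = num // k exactly here: k divides num and 0 < k ≤ num ≤ 2^31 (float quotient exact)
      | some k => facLoop fuel (PySem.Int.floordiv num k) (factor ++ [k])
      | none => factor  -- Python loops forever in this case; unreachable, every num ≥ 2 has a divisor
    else factor

def pyFactorization (num : Int) : List Int := facLoop num.toNat num []

def getStep (a b : Int) : Int :=
  if b = 1 then a - 1
  else if b = 0 then 100
  else PySem.Int.floordiv a b + getStep b (PySem.Int.mod a b)
termination_by b.natAbs
decreasing_by
  rcases lt_trichotomy b 0 with h | h | h
  · have h1 := PySem.Int.mod_neg_bounds (a := a) h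
    omega
  · simp_all
  · have h1 := PySem.Int.mod_nonneg (a := a) h
    have h2 := PySem.Int.mod_lt (a := a) h
    omega

def getNlist (n : Int) : Int :=
  if n = 1 then 0
  else
    let fac := pyFactorization n
    -- int(n/2 + 1) = n // 2 + 1 for n ≥ 0 (float quotient exact for |n| ≤ 2^31); for n < 0 both forms give an empty range
    let l := (PySem.List.pyRange 1 (PySem.Int.floordiv n 2 + 1) 1).foldl
      (fun l i => if pyIsValid i fac == false then l ++ [getStep n i] else l) []
    match PySem.List.min? l (fun x => x) with
    | some m => m
    | none => 0  -- min([]) raises ValueError; excluded by Pre_getNlist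

-- ===== PORT B =====
-- the 'while b > 1: steps += a // b; a, b = b, a % b' loop, returning the final (a, b, steps)
def stepsLoop (a b steps : Int) : Int × Int × Int :=
  if 1 < b then stepsLoop b (PySem.Int.mod a b) (steps + PySem.Int.floordiv a b)
  else (a, b, steps)
termination_by b.toNat
decreasing_by
  have h2 := PySem.Int.mod_lt (a := a) (by omega : (0:Int) < b)
  omega

def getNlist_alt (n : Int) : Int :=
  if n = 1 then 0
  else
    (PySem.List.pyRange 2 (PySem.Int.floordiv n 2 + 1) 1).foldl
      (fun best i =>
        match stepsLoop n i 0 with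
        | (a, b, steps) =>
          if b = 1 then
            let s := steps + a - 1
            if s < best then s else best
          else best)
      (n - 1)

-- ===== PRECONDITION & SPEC =====
-- Pre_ excludes n ≤ 0, on which A raises ValueError (min() of an empty list).
def Pre_getNlist (n : Int) : Prop := 1 ≤ n
instance (n : Int) : Decidable (Pre_getNlist n) := by unfold Pre_getNlist; infer_instance
def pvWitness_getNlist : Int := 6
def Spec_getNlist (n : Int) (out : Int) : Prop := out = getNlist_alt n
instance (n : Int) (out : Int) : Decidable (Spec_getNlist n out) := by unfold Spec_getNlist; infer_instance

-- ===== CLAIM (what is proved, stated in full; the proofs are below) =====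
def Claim_equal_getNlist : Prop := ∀ (n : Int), Dom_getNlist n → Pre_getNlist n → Spec_getNlist n (getNlist n)

-- ===== LEMMAS AND PROOFS =====

lemma dvd_both_not_gcd_one {k a b : Int} (hk : 2 ≤ k) (ha : k ∣ a) (hb : k ∣ b)
    (hg : Int.gcd a b = 1) : False := by
  obtain ⟨u, v, huv⟩ := Int.isCoprime_iff_gcd_eq_one.mpr hg
  have h1 : k ∣ u * a + v * b := dvd_add (ha.mul_left u) (hb.mul_left v)
  rw [huv] at h1
  have := Int.le_of_dvd one_pos h1
  omega

lemma gcd_step (a b : Int) (hb : 0 < b) :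
    Int.gcd b (PySem.Int.mod a b) = Int.gcd a b := by
  rw [PySem.Int.mod_eq_emod_of_pos hb, Int.emod_def,
    show a - b * (a / b) = a + -(a / b) * b from by ring,
    Int.gcd_add_mul_right_right, Int.gcd_comm]

lemma minFac_facts (num : Int) (h2 : 2 ≤ num) :
    2 ≤ (num.toNat.minFac : Int) ∧ (num.toNat.minFac : Int) ∣ num
      ∧ Prime (num.toNat.minFac : Int) := by
  have hne1 : num.toNat ≠ 1 := by omega
  have hp := Nat.minFac_prime hne1
  have h2d : 2 ≤ num.toNat.minFac := hp.two_le
  have hdvd : (num.toNat.minFac : Int) ∣ (num.toNat : Int) :=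
    Int.natCast_dvd_natCast.mpr (Nat.minFac_dvd num.toNat)
  rw [Int.toNat_of_nonneg (by omega)] at hdvd
  exact ⟨by exact_mod_cast h2d, hdvd, Nat.prime_iff_prime_int.mp hp⟩

lemma innerLoop_minFac (num : Int) (h2 : 2 ≤ num) :
    ∀ (fuel : Nat) (a : Int), 0 ≤ a → a + 2 ≤ (num.toNat.minFac : Int) →
      ((num.toNat.minFac : Int) - a).toNat ≤ fuel →
      innerLoop num (PySem.List.pyRange a (num - 1) 1) = some (num.toNat.minFac : Int) := by
  obtain ⟨hd2, hddvd, -⟩ := minFac_facts num h2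
  have hdle : (num.toNat.minFac : Int) ≤ num := Int.le_of_dvd (by omega) hddvd
  intro fuel
  induction fuel with
  | zero => intro a ha hle hf; omega
  | succ fuel ih =>
    intro a ha hle hf
    have hlt : a < num - 1 := by omega
    rw [PySem.List.pyRange_one_cons hlt]
    by_cases hcase : a + 2 = (num.toNat.minFac : Int)
    · have hm0 : PySem.Int.mod num (a + 2) = 0 :=
        (PySem.Int.mod_eq_zero_iff_dvd _ _).mpr (hcase ▸ hddvd)
      simp only [innerLoop, hm0]
      simp [hcase]
    · have hndvd : ¬ (a + 2) ∣ num := by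
        intro hdvd
        have hcast : ((a + 2).toNat : Int) = a + 2 := Int.toNat_of_nonneg (by omega)
        have hnat : (a + 2).toNat ∣ num.toNat := by
          rw [← Int.natCast_dvd_natCast, hcast, Int.toNat_of_nonneg (by omega)]
          exact hdvd
        have := Nat.minFac_le_of_dvd (by omega) hnat
        omega
      have hm0 : ¬ PySem.Int.mod num (a + 2) = 0 :=
        fun h => hndvd ((PySem.Int.mod_eq_zero_iff_dvd _ _).mp h)
      simp only [innerLoop, beq_iff_eq, hm0, if_false]
      exact ih (a + 1) (by omega) (by omega) (by omega)

lemma facLoop_spec : ∀ (fuel : Nat) (num : Int) (acc : List Int), 1 ≤ num → num.toNat ≤ fuel →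
    ∃ F : List Int, facLoop fuel num acc = acc ++ F ∧ F.prod = num ∧ ∀ k ∈ F, Prime k ∧ 2 ≤ k := by
  intro fuel
  induction fuel with
  | zero => intro num acc h1 hf; omega
  | succ fuel ih =>
    intro num acc h1 hf
    by_cases h : 1 < num
    · obtain ⟨hd2, hddvd, hdprime⟩ := minFac_facts num (by omega)
      have hinner := innerLoop_minFac num (by omega)
        ((num.toNat.minFac : Int) - 0).toNat 0 le_rfl (by omega) le_rfl
      have hq : PySem.Int.floordiv num (num.toNat.minFac : Int) = num / (num.toNat.minFac : Int) :=
        PySem.Int.floordiv_eq_ediv_of_pos (by omega)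
      have hqmul : num / (num.toNat.minFac : Int) * (num.toNat.minFac : Int) = num :=
        Int.ediv_mul_cancel hddvd
      have hq1 : 1 ≤ num / (num.toNat.minFac : Int) := by nlinarith
      have hq2 : num / (num.toNat.minFac : Int) * 2 ≤ num := by nlinarith
      obtain ⟨F, hF, hprod, hall⟩ := ih (num / (num.toNat.minFac : Int)) (acc ++ [(num.toNat.minFac : Int)])
        hq1 (by omega)
      refine ⟨(num.toNat.minFac : Int) :: F, ?_, ?_, ?_⟩
      · simp only [facLoop, if_pos h, hinner, hq, hF]
        simp
      · rw [List.prod_cons, hprod, mul_comm, hqmul]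
      · intro k hk
        rcases List.mem_cons.mp hk with hk | hk
        · exact hk ▸ ⟨hdprime, hd2⟩
        · exact hall k hk
    · have hnum : num = 1 := by omega
      refine ⟨[], ?_, by simp [hnum], by simp⟩
      simp [facLoop, h]

lemma pyFactorization_spec (n : Int) (h2 : 2 ≤ n) :
    (pyFactorization n).prod = n ∧ ∀ k ∈ pyFactorization n, Prime k ∧ 2 ≤ k := by
  obtain ⟨F, hF, hprod, hall⟩ := facLoop_spec n.toNat n [] (by omega) le_rfl
  unfold pyFactorization
  rw [hF, List.nil_append]
  exact ⟨hprod, hall⟩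

lemma pyIsValid_iff (i : Int) (L : List Int) :
    pyIsValid i L = true ↔ ∃ k ∈ L, k ∣ i := by
  induction L with
  | nil => simp [pyIsValid]
  | cons k rest ih =>
    by_cases h : PySem.Int.mod i k = 0
    · simp [pyIsValid, h]
      exact Or.inl ((PySem.Int.mod_eq_zero_iff_dvd _ _).mp h)
    · simp only [pyIsValid, beq_iff_eq, h, if_false, ih]
      constructor
      · rintro ⟨x, hx, hxd⟩; exact ⟨x, by simp [hx], hxd⟩
      · rintro ⟨x, hx, hxd⟩
        rcases List.mem_cons.mp hx with rfl | hx
        · exact absurd ((PySem.Int.mod_eq_zero_iff_dvd _ _).mpr hxd) h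
        · exact ⟨x, hx, hxd⟩

lemma pyIsValid_gcd (n i : Int) (h2 : 2 ≤ n) :
    pyIsValid i (pyFactorization n) = true ↔ Int.gcd n i ≠ 1 := by
  obtain ⟨hprod, hall⟩ := pyFactorization_spec n h2
  rw [pyIsValid_iff]
  constructor
  · rintro ⟨k, hkF, hki⟩ hg
    obtain ⟨-, hk2⟩ := hall k hkF
    have hkn : k ∣ n := hprod ▸ List.dvd_prod hkF
    exact dvd_both_not_gcd_one hk2 hkn hki hg
  · intro hg
    have h0 : Int.gcd n i ≠ 0 := by
      intro h0
      obtain ⟨hn, -⟩ := Int.gcd_eq_zero_iff.mp h0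
      omega
    obtain ⟨p, hp, hpdvd⟩ := Nat.exists_prime_and_dvd hg
    have hpint : Prime (p : Int) := Nat.prime_iff_prime_int.mp hp
    have hpg : (p : Int) ∣ (Int.gcd n i : Int) := Int.natCast_dvd_natCast.mpr hpdvd
    have hpn : (p : Int) ∣ n := hpg.trans (Int.gcd_dvd_left n i)
    have hpi : (p : Int) ∣ i := hpg.trans (Int.gcd_dvd_right n i)
    have hpprod : (p : Int) ∣ (pyFactorization n).prod := by rw [hprod]; exact hpn
    obtain ⟨k, hkF, hpk⟩ := (Prime.dvd_prod_iff hpint).mp hpprod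
    obtain ⟨hkprime, hk2⟩ := hall k hkF
    have hassoc := Int.associated_iff.mp (hpint.associated_of_dvd hkprime hpk)
    have hp2 : 2 ≤ (p : Int) := by exact_mod_cast hp.two_le
    have hpk' : (p : Int) = k := by omega
    exact ⟨k, hkF, hpk' ▸ hpi⟩

lemma steps_coprime : ∀ (m : Nat) (b a s : Int), b.toNat ≤ m → 1 ≤ b → Int.gcd a b = 1 →
    ∃ a', stepsLoop a b s = (a', 1, s + getStep a b - (a' - 1)) := by
  intro m
  induction m with
  | zero => intro b a s hb h1 hg; omega
  | succ m ih =>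
    intro b a s hb h1 hg
    by_cases hb1 : b = 1
    · subst hb1
      refine ⟨a, ?_⟩
      rw [stepsLoop]
      simp [getStep]
    · have hb2 : 2 ≤ b := by omega
      have hmnn := PySem.Int.mod_nonneg (a := a) (by omega : (0:Int) < b)
      have hmlt := PySem.Int.mod_lt (a := a) (by omega : (0:Int) < b)
      have hgr : Int.gcd b (PySem.Int.mod a b) = 1 := by rw [gcd_step a b (by omega)]; exact hg
      have hm1 : 1 ≤ PySem.Int.mod a b := by
        rcases Int.lt_or_le 0 (PySem.Int.mod a b) with h | h
        · omega
        · exfalso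
          have hm0 : PySem.Int.mod a b = 0 := by omega
          exact dvd_both_not_gcd_one hb2 ((PySem.Int.mod_eq_zero_iff_dvd _ _).mp hm0)
            dvd_rfl hg
      obtain ⟨a', ha'⟩ := ih (PySem.Int.mod a b) b (s + PySem.Int.floordiv a b)
        (by omega) hm1 hgr
      refine ⟨a', ?_⟩
      rw [stepsLoop, if_pos (by omega : (1:Int) < b), ha']
      conv_rhs => rw [getStep]
      rw [if_neg hb1, if_neg (by omega : b ≠ 0)]
      refine congrArg _ (congrArg _ ?_)
      ring

lemma steps_noncoprime : ∀ (m : Nat) (b a s : Int), b.toNat ≤ m → 1 ≤ b → Int.gcd a b ≠ 1 →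
    (stepsLoop a b s).2.1 = 0 := by
  intro m
  induction m with
  | zero => intro b a s hb h1 hg; omega
  | succ m ih =>
    intro b a s hb h1 hg
    by_cases hb1 : b = 1
    · exact absurd (hb1 ▸ Int.gcd_one_right a) hg
    · have hmnn := PySem.Int.mod_nonneg (a := a) (by omega : (0:Int) < b)
      have hmlt := PySem.Int.mod_lt (a := a) (by omega : (0:Int) < b)
      have hgr : Int.gcd b (PySem.Int.mod a b) ≠ 1 := by rw [gcd_step a b (by omega)]; exact hg
      rw [stepsLoop, if_pos (by omega : (1:Int) < b)]
      by_cases hm0 : PySem.Int.mod a b = 0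
      · rw [hm0, stepsLoop]
        norm_num
      · exact ih (PySem.Int.mod a b) b (s + PySem.Int.floordiv a b) (by omega) (by omega) hgr

lemma foldl_app_if (cond : Int → Bool) (g : Int → Int) :
    ∀ (xs : List Int) (acc : List Int),
      xs.foldl (fun l i => if cond i then l ++ [g i] else l) acc
        = acc ++ xs.filterMap (fun i => if cond i then some (g i) else none) := by
  intro xs
  induction xs with
  | nil => simp
  | cons x t ih =>
    intro acc
    by_cases h : cond x <;> simp [h, ih]

lemma foldl_min_filterMap (h : Int → Option Int) :
    ∀ (xs : List Int) (b : Int),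
      (xs.filterMap h).foldl min b
        = xs.foldl (fun best i => match h i with | some s => min best s | none => best) b := by
  intro xs
  induction xs with
  | nil => simp
  | cons x t ih =>
    intro b
    cases hx : h x <;> simp [hx, ih]

lemma foldl_congr_mem' {α β : Type} (xs : List α) (f g : β → α → β) (init : β)
    (h : ∀ b a, a ∈ xs → f b a = g b a) : xs.foldl f init = xs.foldl g init := by
  induction xs generalizing init with
  | nil => rfl
  | cons x t ih =>
    simp only [List.foldl_cons]
    rw [h init x (by simp)]
    exact ih _ (fun b a ha => h b a (by simp [ha]))

lemma main_eq (n : Int) (h2 : 2 ≤ n) : getNlist n = getNlist_alt n := by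
  have hn1 : n ≠ 1 := by omega
  have hdiv : PySem.Int.floordiv n 2 = n / 2 := PySem.Int.floordiv_eq_ediv_of_pos (by omega)
  have hm2 : (2:Int) ≤ PySem.Int.floordiv n 2 + 1 := by
    rw [hdiv]; omega
  obtain ⟨hprod, hall⟩ := pyFactorization_spec n h2
  have hIV1 : pyIsValid 1 (pyFactorization n) = false := by
    rw [← Bool.not_eq_true, pyIsValid_iff]
    rintro ⟨k, hk, hkd⟩
    have := (hall k hk).2
    have := Int.le_of_dvd one_pos hkd
    omega
  have hg1 : getStep n 1 = n - 1 := by rw [getStep]; simp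
  simp only [getNlist, getNlist_alt, if_neg hn1]
  rw [foldl_app_if, List.nil_append,
    PySem.List.pyRange_one_cons (by omega : (1:Int) < PySem.Int.floordiv n 2 + 1),
    List.filterMap_cons]
  simp only [hIV1, beq_self_eq_true, if_true, hg1]
  rw [PySem.List.min?_id_cons]
  rw [foldl_min_filterMap]
  apply foldl_congr_mem'
  intro best i hi
  rw [PySem.List.mem_pyRange_one] at hi
  by_cases hg : Int.gcd n i = 1
  · have hIVf : ¬ pyIsValid i (pyFactorization n) = true := by
      rw [pyIsValid_gcd n i h2]; simp [hg]
    have hIV : (pyIsValid i (pyFactorization n) == false) = true := by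
      simp only [Bool.not_eq_true] at hIVf
      simp [hIVf]
    obtain ⟨a', ha'⟩ := steps_coprime i.toNat i n 0 le_rfl (by omega) hg
    rw [ha']
    simp only [hIV, if_true]
    have : 0 + getStep n i - (a' - 1) + a' - 1 = getStep n i := by ring
    simp only [this, min_def]
    split_ifs <;> omega
  · have hIVt : pyIsValid i (pyFactorization n) = true := (pyIsValid_gcd n i h2).mpr hg
    have hIV : (pyIsValid i (pyFactorization n) == false) = false := by
      simp [hIVt]
    have hnc := steps_noncoprime i.toNat i n 0 le_rfl (by omega) hg
    rcases hsl : stepsLoop n i 0 with ⟨a', b', s'⟩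
    rw [hsl] at hnc
    simp only [hIV]
    simp at hnc
    simp [hnc]

-- ===== VERDICT (by name: the statement is the Claim_ definition above) =====
theorem getNlist_spec : Claim_equal_getNlist := by
  intro n _ hpre
  unfold Spec_getNlist
  by_cases h1 : n = 1
  · subst h1; rfl
  · exact main_eq n (by unfold Pre_getNlist at hpre; omega)
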